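-- pv_equiv track=rewrite | github.com/Esemudje/Jay-ECE-480-Project- | GMMContourPlots_Kmeans.py | count_lines_per_block
-- ===== SOURCE A (Python) =====
-- def count_lines_per_block(file):
--     block_counts = []
--     current_block_count = 0
--
--     for line in file:
--         if line.strip():  # If not a blank line
--             current_block_count += 1
--         else:
--             if current_block_count > 0:
--                 block_counts.append(current_block_count)
--                 current_block_count = 0  # Reset for next block
--
--     if current_block_count > 0:
--         block_counts.append(current_block_count)
--
--     return block_counts
-- ===== SOURCE B (Python) =====
-- def count_lines_per_block(file):
--     lines = list(file)
--     counts = []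
--     i = 0
--     n = len(lines)
--     while i < n:
--         key = bool(lines[i].strip())
--         j = i + 1
--         while j < n and bool(lines[j].strip()) == key:
--             j += 1
--         if key:
--             counts.append(j - i)
--         i = j
--     return counts
-- ===== Notes on version B (the rewrite author's own statement) =====
-- stated objective: alternative
-- what changed: Replaces A's single-pass running-counter state machine by a run-based scan: each outer step finds the maximal run of same-blankness lines (inner while / takeWhile) and emits its length when the run is non-blank.
import Mathlib
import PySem

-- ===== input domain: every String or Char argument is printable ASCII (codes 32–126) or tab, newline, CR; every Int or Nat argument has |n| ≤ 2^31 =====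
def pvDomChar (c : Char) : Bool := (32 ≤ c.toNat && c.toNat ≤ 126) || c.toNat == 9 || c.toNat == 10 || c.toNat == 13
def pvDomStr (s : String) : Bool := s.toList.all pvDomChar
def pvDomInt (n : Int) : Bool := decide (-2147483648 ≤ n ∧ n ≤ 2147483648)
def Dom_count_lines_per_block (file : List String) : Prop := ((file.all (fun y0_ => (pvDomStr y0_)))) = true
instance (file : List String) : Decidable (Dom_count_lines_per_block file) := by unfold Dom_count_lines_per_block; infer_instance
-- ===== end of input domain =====

-- B replaces A's running-counter state machine by a run-based scan (maximal runs of
-- same-blankness lines, emitting each non-blank run's length); alternative, same cost.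


-- ===== PORT A =====
-- state = (block_counts, current_block_count); one step per line, as in A
def pvStepA (st : List Int × Int) (line : String) : List Int × Int :=
  if !(PySem.Str.strip line == "") then (st.1, st.2 + 1)
  else if st.2 > 0 then (st.1 ++ [st.2], (0 : Int)) else st

def count_lines_per_block (file : List String) : List Int :=
  let st := file.foldl pvStepA ([], 0)
  if st.2 > 0 then st.1 ++ [st.2] else st.1

-- ===== PORT B =====
-- bool(line.strip()) : the grouping key of B
def pvKey (s : String) : Bool := !(PySem.Str.strip s == "")

-- B's outer while loop: each iteration consumes one maximal run of equal-key lines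
-- (the inner 'while j < n and …' is the takeWhile/dropWhile pair) and appends j - i
-- = 1 + run.length when the run is non-blank.
def pvScanB : List String → List Int
  | [] => []
  | x :: xs =>
    let k := pvKey x
    let run := xs.takeWhile (fun y => pvKey y == k)
    let rest := xs.dropWhile (fun y => pvKey y == k)
    if k then ((1 : Int) + run.length) :: pvScanB rest else pvScanB rest
termination_by l => l.length
decreasing_by
  all_goals
    simp only [List.length_cons]
    exact Nat.lt_succ_of_le (List.length_dropWhile_le _ _)

def count_lines_per_block_alt (file : List String) : List Int := pvScanB file

-- ===== PRECONDITION & SPEC =====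
def Spec_count_lines_per_block (file : List String) (out : List Int) : Prop := out = count_lines_per_block_alt file
instance (file : List String) (out : List Int) : Decidable (Spec_count_lines_per_block file out) := by unfold Spec_count_lines_per_block; infer_instance

-- ===== CLAIM (what is proved, stated in full; the proofs are below) =====
def Claim_equal_count_lines_per_block : Prop := ∀ (file : List String), Dom_count_lines_per_block file → Spec_count_lines_per_block file (count_lines_per_block file)

-- ===== LEMMAS AND PROOFS =====

-- reference recursion: result of A's remaining processing from current count c
def pvR : List String → Int → List Int
  | [], c => if c > 0 then [c] else []
  | x :: xs, c =>
    if pvKey x then pvR xs (c + 1)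
    else if c > 0 then c :: pvR xs 0 else pvR xs c

lemma pvStepA_pos {x : String} (acc : List Int) (c : Int) (h : pvKey x = true) :
    pvStepA (acc, c) x = (acc, c + 1) := by
  simp only [pvKey] at h; simp [pvStepA, h]

lemma pvStepA_neg_pos {x : String} (acc : List Int) (c : Int) (h : pvKey x = false)
    (hc : c > 0) : pvStepA (acc, c) x = (acc ++ [c], 0) := by
  simp only [pvKey] at h; simp_all [pvStepA]

lemma pvStepA_neg_neg {x : String} (acc : List Int) (c : Int) (h : pvKey x = false)
    (hc : ¬ c > 0) : pvStepA (acc, c) x = (acc, c) := by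
  simp only [pvKey] at h; simp_all [pvStepA]

lemma pvFoldA_eq (l : List String) : ∀ (acc : List Int) (c : Int),
    (let st := l.foldl pvStepA (acc, c); if st.2 > 0 then st.1 ++ [st.2] else st.1)
      = acc ++ pvR l c := by
  induction l with
  | nil =>
    intro acc c
    simp only [List.foldl_nil, pvR]
    split_ifs <;> simp
  | cons x xs ih =>
    intro acc c
    simp only [List.foldl_cons]
    by_cases hk : pvKey x = true
    · rw [pvStepA_pos acc c hk, ih]
      simp [pvR, hk]
    · have hk' : pvKey x = false := by simpa using hk
      by_cases hc : c > 0
      · rw [pvStepA_neg_pos acc c hk' hc, ih]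
        simp [pvR, hk', hc]
      · rw [pvStepA_neg_neg acc c hk' hc, ih]
        simp [pvR, hk', hc]

-- a blank head at count 0 is skipped by pvR
lemma pvR_blank {y : String} (ys : List String) (hy : pvKey y = false) :
    pvR (y :: ys) 0 = pvR ys 0 := by
  simp [pvR, hy]

-- while inside a non-blank run with positive count, pvR accumulates the run's length
lemma pvR_run (xs : List String) : ∀ c : Int, 0 < c →
    pvR xs c = (c + (xs.takeWhile (fun y => pvKey y == true)).length)
      :: pvR (xs.dropWhile (fun y => pvKey y == true)) 0 := by
  induction xs with
  | nil => intro c hc; simp [pvR, hc]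
  | cons y ys ih =>
    intro c hc
    by_cases hy : pvKey y = true
    · rw [List.takeWhile_cons_of_pos (by simp [hy]), List.dropWhile_cons_of_pos (by simp [hy])]
      simp only [pvR, hy, if_true, List.length_cons]
      rw [ih (c + 1) (by omega)]
      congr 1
      push_cast
      ring
    · have hy' : pvKey y = false := by simpa using hy
      rw [List.takeWhile_cons_of_neg (by simp [hy']), List.dropWhile_cons_of_neg (by simp [hy'])]
      rw [pvR_blank ys hy']
      simp [pvR, hy', hc]

-- dropping blank lines at count 0 does not change pvR
lemma pvR_dropBlank (xs : List String) :
    pvR (xs.dropWhile (fun y => pvKey y == false)) 0 = pvR xs 0 := by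
  induction xs with
  | nil => simp
  | cons y ys ih =>
    by_cases hy : pvKey y = false
    · rw [List.dropWhile_cons_of_pos (by simp [hy]), ih, pvR_blank ys hy]
    · rw [List.dropWhile_cons_of_neg (by simp [hy])]

-- B computes pvR · 0
lemma pvScanB_eq (l : List String) : pvScanB l = pvR l 0 := by
  induction l using pvScanB.induct with
  | case1 => simp [pvScanB, pvR]
  | case2 x xs k drw hk ih =>
    have hk' : pvKey x = true := hk
    have ih' : pvScanB (List.dropWhile (fun y => pvKey y == k) xs)
        = pvR (List.dropWhile (fun y => pvKey y == k) xs) 0 := ih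
    rw [hk] at ih'
    rw [pvScanB]
    simp only [hk', if_true]
    rw [ih']
    have h0 : pvR (x :: xs) 0 = pvR xs 1 := by simp [pvR, hk']
    rw [h0, pvR_run xs 1 (by omega)]
  | case3 x xs k drw hk ih =>
    have hk' : pvKey x = false := by simpa using (hk : ¬ (pvKey x) = true)
    have hkf : k = false := hk'
    have ih' : pvScanB (List.dropWhile (fun y => pvKey y == k) xs)
        = pvR (List.dropWhile (fun y => pvKey y == k) xs) 0 := ih
    rw [hkf] at ih'
    rw [pvScanB]
    simp only [hk', Bool.false_eq_true, if_false]
    rw [ih', pvR_dropBlank, pvR_blank xs hk']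

-- ===== VERDICT (by name: the statement is the Claim_ definition above) =====
theorem count_lines_per_block_spec : Claim_equal_count_lines_per_block := by
  intro file _
  unfold Spec_count_lines_per_block count_lines_per_block count_lines_per_block_alt
  rw [pvScanB_eq]
  simpa using pvFoldA_eq file [] 0
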